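-- pv_equiv track=rewrite | github.com/jbasalone/erpg_dungeon_helper | dung_helpers.py | get_best_d14_start_move
-- ===== SOURCE A (Python) =====
-- import enum
--
-- class D14ids(enum.Enum):
--     PURPLE = 0
--     BROWN = 1
--     RED = 2
--     BLUE = 3
--     ORANGE = 4
--     YELLOW = 5
--     GREEN = 6
--     ATTACK = 7
--     DRAGON = 8
--
-- def get_best_d14_start_move(MAP, X, Y):
--     """
--     For the starting map, it chooses the best move we can do and tells us what should be under the player
--     """
--
--     tiles_around_player = [-1, -1, -1, -1]
--
--     if Y >= 2:
--         tiles_around_player[0] = MAP[Y - 1][X]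
--     if Y < 7:
--         tiles_around_player[1] = MAP[Y + 1][X]
--     if X >= 1:
--         tiles_around_player[2] = MAP[Y][X - 1]
--     if X < 7:
--         tiles_around_player[3] = MAP[Y][X + 1]
--
--     if Y <= 4:
--         order = [D14ids.BROWN.value, D14ids.GREEN.value,
--                  D14ids.YELLOW.value, D14ids.ORANGE.value, D14ids.BLUE.value, D14ids.PURPLE.value, D14ids.RED.value]
--     else:
--         order = [D14ids.BROWN.value, D14ids.GREEN.value, D14ids.BLUE.value, D14ids.PURPLE.value,
--                  D14ids.YELLOW.value, D14ids.ORANGE.value, D14ids.RED.value]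
--
--     move_to = {0: "UP", 1: "DOWN", 2: "LEFT", 3: "RIGHT"}
--     for tile in order:
--         if tile in tiles_around_player:
--             return tile, move_to[tiles_around_player.index(tile)]
-- ===== SOURCE B (Python) =====
-- def get_best_d14_start_move(MAP, X, Y):
--     """
--     For the starting map, it chooses the best move we can do and tells us what should be under the player
--     """
--
--     tiles_around_player = [-1, -1, -1, -1]
--
--     if Y >= 2:
--         tiles_around_player[0] = MAP[Y - 1][X]
--     if Y < 7:
--         tiles_around_player[1] = MAP[Y + 1][X]
--     if X >= 1:
--         tiles_around_player[2] = MAP[Y][X - 1]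
--     if X < 7:
--         tiles_around_player[3] = MAP[Y][X + 1]
--
--     # tile-value -> priority position (BROWN, GREEN, ... as in the two orders)
--     if Y <= 4:
--         order = [1, 6, 5, 4, 3, 0, 2]
--     else:
--         order = [1, 6, 3, 0, 5, 4, 2]
--     rank = {v: i for i, v in enumerate(order)}
--
--     # one pass over the four neighbour slots, tracking the (rank, slot, value)
--     # minimum; strict '<' keeps the earliest slot among equal-rank duplicates
--     best = None
--     for i, v in enumerate(tiles_around_player):
--         r = rank.get(v)
--         if r is not None and (best is None or r < best[0]):
--             best = (r, i, v)
--
--     if best is not None: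
--         return best[2], ("UP", "DOWN", "LEFT", "RIGHT")[best[1]]
--     return None
-- ===== Notes on version B (the rewrite author's own statement) =====
-- stated objective: alternative
-- what changed: A iterates over the preference list and rescans the 4-slot neighbour list twice per preference (membership test plus list.index); B inverts the loop structure: it builds a {tile value: priority} rank dict from the order list and makes one pass over the enumerated neighbour slots tracking the (rank, slot, value) minimum, with strict '<' preserving the earliest slot on ties.
import Mathlib
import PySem

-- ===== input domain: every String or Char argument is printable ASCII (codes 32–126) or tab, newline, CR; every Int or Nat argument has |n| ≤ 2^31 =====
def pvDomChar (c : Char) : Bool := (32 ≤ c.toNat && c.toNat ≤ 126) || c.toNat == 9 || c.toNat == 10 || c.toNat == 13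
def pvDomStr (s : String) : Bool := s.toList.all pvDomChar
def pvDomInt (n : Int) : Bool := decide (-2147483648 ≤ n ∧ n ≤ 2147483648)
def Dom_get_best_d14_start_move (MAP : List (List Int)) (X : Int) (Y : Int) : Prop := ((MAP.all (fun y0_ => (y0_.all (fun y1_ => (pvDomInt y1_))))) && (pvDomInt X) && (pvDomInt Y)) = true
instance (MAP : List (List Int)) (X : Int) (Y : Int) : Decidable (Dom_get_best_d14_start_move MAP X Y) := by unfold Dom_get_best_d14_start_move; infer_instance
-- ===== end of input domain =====

-- B replaces A's scan over the preference list (with a membership test and a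
-- list.index rescan of the neighbours per preference) by ONE pass over the four
-- enumerated neighbour slots tracking the (rank, slot, value) minimum under a
-- rank dict built from the order list (objective: alternative).

-- ===== PORT A =====
-- MAP[r][c]; the -1 default is never reached under Pre_ (Python raises IndexError there)
def pvTileAt (MAP : List (List Int)) (r c : Int) : Int :=
  (((PySem.List.pyGet? MAP r).bind (fun row => PySem.List.pyGet? row c)).getD (-1))

-- 'for tile in order: if tile in tiles: return tile, move_to[tiles.index(tile)]'
def pvLoopA (tiles : List Int) (move_to : PySem.Dict Int String) : List Int → Option (Int × String)
  | [] => none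
  | o :: rest =>
    if tiles.contains o then
      -- index? is some (tile is in tiles) and move_to has keys 0..3, so "" is never reached
      some (o, (((PySem.List.index? tiles o).bind
                  (fun i => PySem.Dict.get? move_to (i : Int)))).getD "")
    else pvLoopA tiles move_to rest

def get_best_d14_start_move (MAP : List (List Int)) (X : Int) (Y : Int) : Option (Int × String) :=
  let t0 := if Y ≥ 2 then pvTileAt MAP (Y - 1) X else -1
  let t1 := if Y < 7 then pvTileAt MAP (Y + 1) X else -1
  let t2 := if X ≥ 1 then pvTileAt MAP Y (X - 1) else -1
  let t3 := if X < 7 then pvTileAt MAP Y (X + 1) else -1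
  let tiles_around_player := [t0, t1, t2, t3]
  let order : List Int := if Y ≤ 4 then [1, 6, 5, 4, 3, 0, 2] else [1, 6, 3, 0, 5, 4, 2]
  let move_to : PySem.Dict Int String :=
    PySem.Dict.mk [(0, "UP"), (1, "DOWN"), (2, "LEFT"), (3, "RIGHT")]
  pvLoopA tiles_around_player move_to order

-- ===== PORT B =====
-- loop body of B: 'r = rank.get(v); if r is not None and (best is None or r < best[0]): best = (r, i, v)'
def pvStepB (rank : PySem.Dict Int Int) (best : Option (Int × Int × Int)) (iv : Int × Int) :
    Option (Int × Int × Int) :=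
  match PySem.Dict.get? rank iv.2 with
  | none => best
  | some r =>
    match best with
    | none => some (r, iv.1, iv.2)
    | some b => if r < b.1 then some (r, iv.1, iv.2) else best

def get_best_d14_start_move_alt (MAP : List (List Int)) (X : Int) (Y : Int) : Option (Int × String) :=
  let t0 := if Y ≥ 2 then pvTileAt MAP (Y - 1) X else -1
  let t1 := if Y < 7 then pvTileAt MAP (Y + 1) X else -1
  let t2 := if X ≥ 1 then pvTileAt MAP Y (X - 1) else -1
  let t3 := if X < 7 then pvTileAt MAP Y (X + 1) else -1
  let tiles_around_player := [t0, t1, t2, t3]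
  let order : List Int := if Y ≤ 4 then [1, 6, 5, 4, 3, 0, 2] else [1, 6, 3, 0, 5, 4, 2]
  -- rank = {v: i for i, v in enumerate(order)}
  let rank : PySem.Dict Int Int :=
    (PySem.List.enumerate order).foldl (fun d p => PySem.Dict.insert d p.2 p.1) PySem.Dict.empty
  -- for i, v in enumerate(tiles_around_player): …
  let best := (PySem.List.enumerate tiles_around_player).foldl (pvStepB rank) none
  match best with
  | some b => some (b.2.2, (PySem.List.pyGet? ["UP", "DOWN", "LEFT", "RIGHT"] b.2.1).getD "")
  | none => none

-- ===== PRECONDITION & SPEC =====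
-- Pre_ holds exactly when every guarded MAP[..][..] access is in range (Python's
-- negative-index rule included); outside it the Python A (and B) raise IndexError.
def pvOk (MAP : List (List Int)) (r c : Int) : Bool :=
  match PySem.List.pyGet? MAP r with
  | some row => (PySem.List.pyGet? row c).isSome
  | none => false

def Pre_get_best_d14_start_move (MAP : List (List Int)) (X : Int) (Y : Int) : Prop :=
  (Y ≥ 2 → pvOk MAP (Y - 1) X = true) ∧ (Y < 7 → pvOk MAP (Y + 1) X = true) ∧
  (X ≥ 1 → pvOk MAP Y (X - 1) = true) ∧ (X < 7 → pvOk MAP Y (X + 1) = true)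
instance (MAP : List (List Int)) (X : Int) (Y : Int) : Decidable (Pre_get_best_d14_start_move MAP X Y) := by unfold Pre_get_best_d14_start_move; infer_instance

def pvWitness_get_best_d14_start_move : List (List Int) × Int × Int :=
  ([[7, 1, 2], [3, 0, 5], [6, 4, 8]], 1, 1)

def Spec_get_best_d14_start_move (MAP : List (List Int)) (X : Int) (Y : Int) (out : Option (Int × String)) : Prop := out = get_best_d14_start_move_alt MAP X Y
instance (MAP : List (List Int)) (X : Int) (Y : Int) (out : Option (Int × String)) : Decidable (Spec_get_best_d14_start_move MAP X Y out) := by unfold Spec_get_best_d14_start_move; infer_instance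

-- ===== CLAIM (what is proved, stated in full; the proofs are below) =====
def Claim_equal_get_best_d14_start_move : Prop := ∀ (MAP : List (List Int)) (X : Int) (Y : Int), Dom_get_best_d14_start_move MAP X Y → Pre_get_best_d14_start_move MAP X Y → Spec_get_best_d14_start_move MAP X Y (get_best_d14_start_move MAP X Y)

-- ===== LEMMAS AND PROOFS =====

-- the rank of a tile value in a preference list (proof-side abstraction of B's dict)
def pvRank (order : List Int) (v : Int) : Option Int :=
  (PySem.List.index? order v).map Int.ofNat

-- abstract form of B's loop body, over any rank function
def pvStepF (f : Int → Option Int) (best : Option (Int × Int × Int)) (iv : Int × Int) :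
    Option (Int × Int × Int) :=
  match f iv.2 with
  | none => best
  | some r =>
    match best with
    | none => some (r, iv.1, iv.2)
    | some b => if r < b.1 then some (r, iv.1, iv.2) else best

theorem pvStepB_eq_stepF (rank : PySem.Dict Int Int) :
    pvStepB rank = pvStepF (fun v => PySem.Dict.get? rank v) := rfl

def pvFinish : Option (Int × Int × Int) → Option (Int × String)
  | some b => some (b.2.2, (PySem.List.pyGet? ["UP", "DOWN", "LEFT", "RIGHT"] b.2.1).getD "")
  | none => none

def pvChain (f : Int → Option Int) (t0 t1 t2 t3 : Int) : Option (Int × Int × Int) :=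
  [((0:Int), t0), (1, t1), (2, t2), (3, t3)].foldl (pvStepF f) none

theorem pvRank_cons_self (o : Int) (rest : List Int) : pvRank (o :: rest) o = some 0 := by
  unfold pvRank
  rw [PySem.List.index?_cons_self]
  rfl

theorem pvRank_cons_of_ne (o v : Int) (rest : List Int) (h : o ≠ v) :
    pvRank (o :: rest) v = (pvRank rest v).map (· + 1) := by
  unfold pvRank
  rw [PySem.List.index?_cons_of_ne _ h]
  cases PySem.List.index? rest v <;> simp

theorem pvRank_nonneg (order : List Int) (v r : Int) (h : pvRank order v = some r) : 0 ≤ r := by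
  unfold pvRank at h
  rcases hx : PySem.List.index? order v with _ | n <;> rw [hx] at h <;> simp_all
  omega

-- once best has rank 0, nothing changes it (rank values are nonnegative, '<' is strict)
theorem pv_foldl_keep (f : Int → Option Int) (hf : ∀ v r, f v = some r → 0 ≤ r)
    (l : List (Int × Int)) (b : Int × Int × Int) (hb : b.1 = 0) :
    l.foldl (pvStepF f) (some b) = some b := by
  induction l with
  | nil => rfl
  | cons p tl ih =>
    have : pvStepF f (some b) p = some b := by
      unfold pvStepF
      rcases hx : f p.2 with _ | r
      · rfl
      · have := hf _ _ hx
        simp [hb]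
        omega
    simp [List.foldl, this, ih]

-- shifting all ranks by +1 changes only the rank component of the running best
theorem pv_foldl_shift (g f' : Int → Option Int) (l : List (Int × Int))
    (hl : ∀ p ∈ l, f' p.2 = (g p.2).map (· + 1)) (acc : Option (Int × Int × Int)) :
    l.foldl (pvStepF f') (acc.map (fun t => (t.1 + 1, t.2))) =
      (l.foldl (pvStepF g) acc).map (fun t => (t.1 + 1, t.2)) := by
  induction l generalizing acc with
  | nil => rfl
  | cons p tl ih =>
    have hstep : pvStepF f' (acc.map (fun t => (t.1 + 1, t.2))) p =
        (pvStepF g acc p).map (fun t => (t.1 + 1, t.2)) := by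
      unfold pvStepF
      rw [hl p (List.mem_cons_self)]
      rcases g p.2 with _ | r
      · rfl
      · simp only [Option.map_some]
        rcases acc with _ | b
        · rfl
        · simp only [Option.map_some]
          by_cases hc : r < b.1
          · rw [if_pos hc, if_pos (show r + 1 < ((fun t : Int × Int × Int => (t.1 + 1, t.2)) b).1 by simp; omega)]
            simp
          · rw [if_neg hc, if_neg (show ¬ r + 1 < ((fun t : Int × Int × Int => (t.1 + 1, t.2)) b).1 by simp; omega)]
            simp
    rw [List.foldl_cons, List.foldl_cons, hstep, ih (fun q hq => hl q (List.mem_cons_of_mem _ hq)) _]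

theorem pv_finish_shift (x : Option (Int × Int × Int)) :
    pvFinish (x.map (fun t => (t.1 + 1, t.2))) = pvFinish x := by
  rcases x with _ | b <;> rfl

-- ranks of values other than the head of the order list are at least 1
theorem pvRank_cons_pos (o v : Int) (rest : List Int) (h : o ≠ v) :
    ∀ r, pvRank (o :: rest) v = some r → 1 ≤ r := by
  intro r hr
  rw [pvRank_cons_of_ne _ _ _ h] at hr
  rcases hx : pvRank rest v with _ | s <;> rw [hx] at hr <;> simp_all
  have := pvRank_nonneg _ _ _ hx
  omega

-- reduction equations for one step of B's loop
theorem pvStepF_none_none (f : Int → Option Int) (iv : Int × Int) (hv : f iv.2 = none) :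
    pvStepF f none iv = none := by
  unfold pvStepF; rw [hv]

theorem pvStepF_none_some (f : Int → Option Int) (iv : Int × Int) (r : Int)
    (hv : f iv.2 = some r) : pvStepF f none iv = some (r, iv.1, iv.2) := by
  unfold pvStepF; rw [hv]

theorem pvStepF_some_none (f : Int → Option Int) (c : Int × Int × Int) (iv : Int × Int)
    (hv : f iv.2 = none) : pvStepF f (some c) iv = some c := by
  unfold pvStepF; rw [hv]

theorem pvStepF_some_some (f : Int → Option Int) (c : Int × Int × Int) (iv : Int × Int)
    (r : Int) (hv : f iv.2 = some r) :
    pvStepF f (some c) iv = if r < c.1 then some (r, iv.1, iv.2) else some c := by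
  unfold pvStepF; rw [hv]

-- one step keeps the invariant 'the running best has rank ≥ 1'
theorem pv_step_Q (f : Int → Option Int) (acc : Option (Int × Int × Int)) (iv : Int × Int)
    (hfv : ∀ r, f iv.2 = some r → 1 ≤ r) (h : ∀ b, acc = some b → 1 ≤ b.1) :
    ∀ b, pvStepF f acc iv = some b → 1 ≤ b.1 := by
  intro b hb
  rcases hv : f iv.2 with _ | r
  · rcases acc with _ | c
    · rw [pvStepF_none_none _ _ hv] at hb; cases hb
    · rw [pvStepF_some_none _ _ _ hv] at hb; exact h _ hb
  · have hr := hfv _ hv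
    rcases acc with _ | c
    · rw [pvStepF_none_some _ _ _ hv] at hb; cases hb; exact hr
    · rw [pvStepF_some_some _ _ _ _ hv] at hb
      by_cases hc : r < c.1
      · rw [if_pos hc] at hb; cases hb; exact hr
      · rw [if_neg hc] at hb; exact h _ hb

-- a rank-0 tile always takes over from a best of rank ≥ 1 (or from none)
theorem pv_step_zero (f : Int → Option Int) (acc : Option (Int × Int × Int)) (iv : Int × Int)
    (hv : f iv.2 = some 0) (h : ∀ b, acc = some b → 1 ≤ b.1) :
    pvStepF f acc iv = some (0, iv.1, iv.2) := by
  rcases acc with _ | c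
  · exact pvStepF_none_some _ _ _ hv
  · rw [pvStepF_some_some _ _ _ _ hv, if_pos (by have := h c rfl; omega)]

-- the heart of the equivalence: A's preference scan = B's one-pass rank minimum
theorem pv_main (order : List Int) (t0 t1 t2 t3 : Int) :
    pvLoopA [t0, t1, t2, t3] (PySem.Dict.mk [(0, "UP"), (1, "DOWN"), (2, "LEFT"), (3, "RIGHT")]) order
      = pvFinish (pvChain (pvRank order) t0 t1 t2 t3) := by
  induction order with
  | nil =>
    simp [pvLoopA, pvChain, pvStepF, pvRank, pvFinish, List.foldl,
      PySem.List.index?_eq_idxOf?]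
  | cons o rest ih =>
    have hnn : ∀ v r, pvRank (o :: rest) v = some r → 0 ≤ r := pvRank_nonneg _
    unfold pvChain
    by_cases h0 : t0 = o
    · subst h0
      rw [pvLoopA, if_pos (by simp), PySem.List.index?_cons_self]
      rw [List.foldl_cons,
          pv_step_zero (pvRank (t0 :: rest)) none ((0:Int), t0) (pvRank_cons_self _ _)
            (by intro b hb; cases hb),
          pv_foldl_keep _ hnn _ _ rfl]
      simp [pvFinish, PySem.Dict.get?_mk_cons, PySem.List.pyGet?, PySem.List.pyIdx?]
    · have q0 : ∀ b, pvStepF (pvRank (o :: rest)) none ((0:Int), t0) = some b → 1 ≤ b.1 :=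
        pv_step_Q _ _ _ (pvRank_cons_pos _ _ _ (fun h => h0 h.symm)) (by intro b hb; cases hb)
      by_cases h1 : t1 = o
      · subst h1
        rw [pvLoopA, if_pos (by simp), PySem.List.index?_cons_of_ne _ h0,
            PySem.List.index?_cons_self]
        rw [List.foldl_cons, List.foldl_cons,
            pv_step_zero (pvRank (t1 :: rest))
              (pvStepF (pvRank (t1 :: rest)) none ((0:Int), t0)) ((1:Int), t1)
              (pvRank_cons_self _ _) q0,
            pv_foldl_keep _ hnn _ _ rfl]
        simp [pvFinish, PySem.Dict.get?_mk_cons, PySem.List.pyGet?, PySem.List.pyIdx?]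
      · have q1 : ∀ b, pvStepF (pvRank (o :: rest))
            (pvStepF (pvRank (o :: rest)) none ((0:Int), t0)) ((1:Int), t1) = some b → 1 ≤ b.1 :=
          pv_step_Q _ _ _ (pvRank_cons_pos _ _ _ (fun h => h1 h.symm)) q0
        by_cases h2 : t2 = o
        · subst h2
          rw [pvLoopA, if_pos (by simp), PySem.List.index?_cons_of_ne _ h0,
              PySem.List.index?_cons_of_ne _ h1, PySem.List.index?_cons_self]
          rw [List.foldl_cons, List.foldl_cons, List.foldl_cons,
              pv_step_zero (pvRank (t2 :: rest))
                (pvStepF (pvRank (t2 :: rest)) (pvStepF (pvRank (t2 :: rest)) none ((0:Int), t0))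
                  ((1:Int), t1)) ((2:Int), t2) (pvRank_cons_self _ _) q1,
              pv_foldl_keep _ hnn _ _ rfl]
          simp [pvFinish, PySem.Dict.get?_mk_cons, PySem.List.pyGet?, PySem.List.pyIdx?]
        · have q2 : ∀ b, pvStepF (pvRank (o :: rest))
              (pvStepF (pvRank (o :: rest)) (pvStepF (pvRank (o :: rest)) none ((0:Int), t0))
                ((1:Int), t1)) ((2:Int), t2) = some b → 1 ≤ b.1 :=
            pv_step_Q _ _ _ (pvRank_cons_pos _ _ _ (fun h => h2 h.symm)) q1
          by_cases h3 : t3 = o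
          · subst h3
            rw [pvLoopA, if_pos (by simp), PySem.List.index?_cons_of_ne _ h0,
                PySem.List.index?_cons_of_ne _ h1, PySem.List.index?_cons_of_ne _ h2,
                PySem.List.index?_cons_self]
            rw [List.foldl_cons, List.foldl_cons, List.foldl_cons, List.foldl_cons,
                List.foldl_nil,
                pv_step_zero (pvRank (t3 :: rest))
                  (pvStepF (pvRank (t3 :: rest))
                    (pvStepF (pvRank (t3 :: rest)) (pvStepF (pvRank (t3 :: rest)) none ((0:Int), t0))
                      ((1:Int), t1)) ((2:Int), t2)) ((3:Int), t3) (pvRank_cons_self _ _) q2]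
            simp [pvFinish, PySem.Dict.get?_mk_cons, PySem.List.pyGet?, PySem.List.pyIdx?]
          · -- o is not among the four neighbours: A skips it; all B ranks shift by one
            rw [pvLoopA,
                if_neg (by simp [Ne.symm h0, Ne.symm h1, Ne.symm h2, Ne.symm h3]; try tauto), ih]
            unfold pvChain
            have hl : ∀ p ∈ [((0:Int), t0), (1, t1), (2, t2), (3, t3)],
                pvRank (o :: rest) p.2 = (pvRank rest p.2).map (· + 1) := by
              intro p hp
              simp only [List.mem_cons, List.not_mem_nil, or_false] at hp
              rcases hp with h | h | h | h <;> subst h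
              · exact pvRank_cons_of_ne _ _ _ (fun hh => h0 hh.symm)
              · exact pvRank_cons_of_ne _ _ _ (fun hh => h1 hh.symm)
              · exact pvRank_cons_of_ne _ _ _ (fun hh => h2 hh.symm)
              · exact pvRank_cons_of_ne _ _ _ (fun hh => h3 hh.symm)
            have := pv_foldl_shift (pvRank rest) (pvRank (o :: rest))
              [((0:Int), t0), (1, t1), (2, t2), (3, t3)] hl none
            simp only [Option.map_none] at this
            rw [this, pv_finish_shift]

-- B's rank dict computes pvRank, for each of the two concrete order lists
theorem pv_rank_dict_1 (v : Int) :
    PySem.Dict.get? ((PySem.List.enumerate [(1:Int), 6, 5, 4, 3, 0, 2]).foldl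
      (fun d p => PySem.Dict.insert d p.2 p.1) PySem.Dict.empty) v
      = pvRank [1, 6, 5, 4, 3, 0, 2] v := by
  by_cases h1 : v = 1; · subst h1; decide
  by_cases h6 : v = 6; · subst h6; decide
  by_cases h5 : v = 5; · subst h5; decide
  by_cases h4 : v = 4; · subst h4; decide
  by_cases h3 : v = 3; · subst h3; decide
  by_cases h0 : v = 0; · subst h0; decide
  by_cases h2 : v = 2; · subst h2; decide
  rw [show pvRank [1, 6, 5, 4, 3, 0, 2] v = none by
    simp [pvRank]; tauto]
  simp [PySem.List.enumerate_cons, PySem.List.enumerate_nil, List.foldl,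
    PySem.Dict.get?_insert, h1, h6, h5, h4, h3, h0, h2, PySem.Dict.get?_empty]

theorem pv_rank_dict_2 (v : Int) :
    PySem.Dict.get? ((PySem.List.enumerate [(1:Int), 6, 3, 0, 5, 4, 2]).foldl
      (fun d p => PySem.Dict.insert d p.2 p.1) PySem.Dict.empty) v
      = pvRank [1, 6, 3, 0, 5, 4, 2] v := by
  by_cases h1 : v = 1; · subst h1; decide
  by_cases h6 : v = 6; · subst h6; decide
  by_cases h3 : v = 3; · subst h3; decide
  by_cases h0 : v = 0; · subst h0; decide
  by_cases h5 : v = 5; · subst h5; decide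
  by_cases h4 : v = 4; · subst h4; decide
  by_cases h2 : v = 2; · subst h2; decide
  rw [show pvRank [1, 6, 3, 0, 5, 4, 2] v = none by
    simp [pvRank]; tauto]
  simp [PySem.List.enumerate_cons, PySem.List.enumerate_nil, List.foldl,
    PySem.Dict.get?_insert, h1, h6, h3, h0, h5, h4, h2, PySem.Dict.get?_empty]

-- B's whole body equals pvFinish ∘ pvChain over the abstract rank function
theorem pv_alt_eq (MAP : List (List Int)) (X Y : Int) :
    get_best_d14_start_move_alt MAP X Y =
      pvFinish (pvChain
        (pvRank (if Y ≤ 4 then [1, 6, 5, 4, 3, 0, 2] else [1, 6, 3, 0, 5, 4, 2]))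
        (if Y ≥ 2 then pvTileAt MAP (Y - 1) X else -1)
        (if Y < 7 then pvTileAt MAP (Y + 1) X else -1)
        (if X ≥ 1 then pvTileAt MAP Y (X - 1) else -1)
        (if X < 7 then pvTileAt MAP Y (X + 1) else -1)) := by
  have henum : ∀ a b c d : Int, PySem.List.enumerate [a, b, c, d]
      = [((0:Int), a), (1, b), (2, c), (3, d)] := by
    intro a b c d
    simp [PySem.List.enumerate_cons, PySem.List.enumerate_nil]
  have hrank : (fun v => PySem.Dict.get? ((PySem.List.enumerate
        (if Y ≤ 4 then [(1:Int), 6, 5, 4, 3, 0, 2] else [1, 6, 3, 0, 5, 4, 2])).foldl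
        (fun d p => PySem.Dict.insert d p.2 p.1) PySem.Dict.empty) v)
      = pvRank (if Y ≤ 4 then [1, 6, 5, 4, 3, 0, 2] else [1, 6, 3, 0, 5, 4, 2]) := by
    funext v
    by_cases hY : Y ≤ 4 <;> simp only [hY, if_true, if_false]
    · exact pv_rank_dict_1 v
    · exact pv_rank_dict_2 v
  unfold get_best_d14_start_move_alt pvChain pvFinish
  simp only [pvStepB_eq_stepF, henum, hrank]

-- ===== VERDICT (by name: the statement is the Claim_ definition above) =====
theorem get_best_d14_start_move_spec : Claim_equal_get_best_d14_start_move := by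
  intro MAP X Y _ _
  unfold Spec_get_best_d14_start_move
  rw [pv_alt_eq]
  unfold get_best_d14_start_move
  exact pv_main _ _ _ _ _
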